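-- pv_equiv track=rewrite | github.com/bernardo-blando/adventofcode_2023 | Day06/day06.py | find_wining_values
-- ===== SOURCE A (Python) =====
-- def find_wining_values(maxX, y):
--   results = []
--   for wait in range(maxX):
--       b = -wait
--       speed = -b
--       d = speed*(maxX + b)
--       if d > y:
--           results.append((wait))
--   return results
-- ===== SOURCE B (Python) =====
-- def _isqrt(n):
--     # binary search for floor(sqrt(n)), n >= 0
--     lo, hi = 0, n + 1
--     while hi - lo > 1:
--         mid = (lo + hi) // 2
--         if mid * mid <= n:
--             lo = mid
--         else:
--             hi = mid
--     return lo
--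
--
-- def find_wining_values(maxX, y):
--     # wait*(maxX-wait) > y  <=>  (2*wait - maxX)^2 < maxX^2 - 4*y
--     if maxX <= 0:
--         return []
--     D = maxX * maxX - 4 * y
--     if D <= 0:
--         return []
--     r = _isqrt(D - 1)
--     lo = max(0, -((r - maxX) // 2))
--     hi = min(maxX - 1, (maxX + r) // 2)
--     return list(range(lo, hi + 1))
-- ===== Notes on version B (the rewrite author's own statement) =====
-- stated objective: faster
-- what changed: Replaced the linear scan over range(maxX) with a closed-form solve of the quadratic inequality wait*(maxX-wait) > y via an integer square root, emitting the winning interval directly as a range.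
import Mathlib
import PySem

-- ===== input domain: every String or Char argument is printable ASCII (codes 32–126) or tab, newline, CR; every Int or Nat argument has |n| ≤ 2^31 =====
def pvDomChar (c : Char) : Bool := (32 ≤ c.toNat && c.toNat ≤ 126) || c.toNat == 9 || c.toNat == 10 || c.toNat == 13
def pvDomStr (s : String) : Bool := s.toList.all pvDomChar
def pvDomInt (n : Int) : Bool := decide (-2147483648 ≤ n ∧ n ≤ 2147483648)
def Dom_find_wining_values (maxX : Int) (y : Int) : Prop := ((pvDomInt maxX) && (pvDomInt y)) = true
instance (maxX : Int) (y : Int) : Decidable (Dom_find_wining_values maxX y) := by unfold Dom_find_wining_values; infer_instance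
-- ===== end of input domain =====

-- B replaces A's linear scan by solving the quadratic inequality with an integer square
-- root and emitting the winning interval as a range (objective: faster, asymptotically).

-- ===== PORT A =====
def find_wining_values (maxX : Int) (y : Int) : List Int :=
  (PySem.List.pyRange 0 maxX 1).foldl
    (fun results wait =>
      let b := -wait
      let speed := -b
      let d := speed * (maxX + b)
      if d > y then results ++ [wait] else results)
    []

-- ===== PORT B =====
-- helper for B: binary-search integer square root (port of _isqrt in Source B);
-- the fuel argument (hi - lo on entry) bounds the iteration count and never runs out
def isqrtLoop (n : Int) : Nat → Int → Int → Int
  | 0, lo, _ => lo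
  | fuel + 1, lo, hi =>
    if hi - lo > 1 then
      if PySem.Int.floordiv (lo + hi) 2 * PySem.Int.floordiv (lo + hi) 2 ≤ n then
        isqrtLoop n fuel (PySem.Int.floordiv (lo + hi) 2) hi
      else
        isqrtLoop n fuel lo (PySem.Int.floordiv (lo + hi) 2)
    else lo

def pyIsqrt (n : Int) : Int := isqrtLoop n (n + 1).toNat 0 (n + 1)

def find_wining_values_alt (maxX : Int) (y : Int) : List Int :=
  if maxX ≤ 0 then []
  else
    let D := maxX * maxX - 4 * y
    if D ≤ 0 then []
    else
      let r := pyIsqrt (D - 1)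
      let lo := max 0 (-(PySem.Int.floordiv (r - maxX) 2))
      let hi := min (maxX - 1) (PySem.Int.floordiv (maxX + r) 2)
      PySem.List.pyRange lo (hi + 1) 1

-- ===== PRECONDITION & SPEC =====
def Spec_find_wining_values (maxX : Int) (y : Int) (out : List Int) : Prop := out = find_wining_values_alt maxX y
instance (maxX : Int) (y : Int) (out : List Int) : Decidable (Spec_find_wining_values maxX y out) := by unfold Spec_find_wining_values; infer_instance

-- ===== CLAIM (what is proved, stated in full; the proofs are below) =====
def Claim_equal_find_wining_values : Prop := ∀ (maxX : Int) (y : Int), Dom_find_wining_values maxX y → Spec_find_wining_values maxX y (find_wining_values maxX y)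

-- ===== LEMMAS AND PROOFS =====

-- isqrtLoop keeps the invariant lo*lo ≤ n < hi*hi and returns floor(sqrt n)
theorem isqrtLoop_spec (n : Int) : ∀ fuel : Nat, ∀ lo hi : Int, 0 ≤ lo → lo < hi →
    hi - lo ≤ (fuel : Int) + 1 →
    lo * lo ≤ n → n < hi * hi →
    0 ≤ isqrtLoop n fuel lo hi ∧ isqrtLoop n fuel lo hi * isqrtLoop n fuel lo hi ≤ n ∧
      n < (isqrtLoop n fuel lo hi + 1) * (isqrtLoop n fuel lo hi + 1) := by
  intro fuel
  induction fuel with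
  | zero =>
    intro lo hi h0 hlt hf hlo hhi
    have : hi = lo + 1 := by omega
    subst this
    exact ⟨h0, hlo, hhi⟩
  | succ k ih =>
    intro lo hi h0 hlt hf hlo hhi
    have he := PySem.Int.floordiv_eq_ediv_of_pos (a := lo + hi) (by norm_num : (0:Int) < 2)
    rw [isqrtLoop]
    by_cases hgap : hi - lo > 1
    · rw [if_pos hgap]
      by_cases hle : PySem.Int.floordiv (lo + hi) 2 * PySem.Int.floordiv (lo + hi) 2 ≤ n
      · rw [if_pos hle]
        exact ih _ hi (by omega) (by omega) (by omega) hle hhi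
      · rw [if_neg hle]
        exact ih lo _ h0 (by omega) (by omega) hlo (not_le.mp hle)
    · rw [if_neg hgap]
      have : hi = lo + 1 := by omega
      subst this
      exact ⟨h0, hlo, hhi⟩

theorem pyIsqrt_spec (n : Int) (hn : 0 ≤ n) :
    0 ≤ pyIsqrt n ∧ pyIsqrt n * pyIsqrt n ≤ n ∧ n < (pyIsqrt n + 1) * (pyIsqrt n + 1) := by
  have h1 : (0:Int) * 0 ≤ n := by omega
  have h2 : n < (n + 1) * (n + 1) := by nlinarith
  exact isqrtLoop_spec n (n + 1).toNat 0 (n + 1) le_rfl (by omega) (by omega) h1 h2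

-- floor-division by 2 bracket
theorem fdiv2_bounds (a : Int) :
    2 * PySem.Int.floordiv a 2 ≤ a ∧ a < 2 * PySem.Int.floordiv a 2 + 2 := by
  have hb : (0:Int) < 2 := by norm_num
  have := (PySem.Int.floordiv_eq_iff_of_pos (a := a) (b := 2) (q := PySem.Int.floordiv a 2) hb).mp rfl
  omega

-- filtering a unit-step range by an interval predicate yields the intersected range
theorem filter_pyRange_interval (L H : Int) : ∀ m : Nat, ∀ a b : Int, (b - a).toNat = m →
    (PySem.List.pyRange a b 1).filter (fun w => decide (L ≤ w ∧ w ≤ H))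
      = PySem.List.pyRange (max a L) (min b (H + 1)) 1 := by
  intro m
  induction m with
  | zero =>
    intro a b hm
    have hba : b ≤ a := by omega
    rw [PySem.List.pyRange_one_eq_nil hba, PySem.List.pyRange_one_eq_nil (by omega)]
    rfl
  | succ k ih =>
    intro a b hm
    have hab : a < b := by omega
    rw [PySem.List.pyRange_one_cons hab, List.filter_cons]
    by_cases hL : L ≤ a
    · by_cases hH : a ≤ H
      · simp only [decide_eq_true_eq, hL, hH, and_self, if_true]
        rw [ih (a + 1) b (by omega)]
        have h1 : max a L = a := by omega
        have h2 : max (a + 1) L = a + 1 := by omega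
        rw [h1, h2, ← PySem.List.pyRange_one_cons (by omega)]
      · have hd : (decide (L ≤ a ∧ a ≤ H)) = false := by simp [hH]
        rw [hd]
        simp only [Bool.false_eq_true, if_false]
        rw [ih (a + 1) b (by omega)]
        rw [PySem.List.pyRange_one_eq_nil (show min b (H+1) ≤ max (a+1) L by omega),
            PySem.List.pyRange_one_eq_nil (show min b (H+1) ≤ max a L by omega)]
    · have hd : (decide (L ≤ a ∧ a ≤ H)) = false := by simp [hL]
      rw [hd]
      simp only [Bool.false_eq_true, if_false]
      rw [ih (a + 1) b (by omega)]
      have hmax : max (a + 1) L = max a L := by omega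
      rw [hmax]

theorem find_wining_values_spec : Claim_equal_find_wining_values := by
  intro maxX y _
  unfold Spec_find_wining_values
  have hA : find_wining_values maxX y
      = (PySem.List.pyRange 0 maxX 1).filter (fun w => decide (-(-w) * (maxX + -w) > y)) := by
    unfold find_wining_values
    rw [show (fun (results : List Int) (wait : Int) =>
          let b := -wait
          let speed := -b
          let d := speed * (maxX + b)
          if d > y then results ++ [wait] else results)
        = (fun (results : List Int) (wait : Int) =>
            if -(-wait) * (maxX + -wait) > y then results ++ [wait] else results) from rfl]
    rw [PySem.List.foldl_append_ite_eq_filter]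
    rfl
  rw [hA]
  unfold find_wining_values_alt
  by_cases hm : maxX ≤ 0
  · rw [if_pos hm, PySem.List.pyRange_one_eq_nil (by omega)]
    rfl
  · rw [if_neg hm]
    by_cases hD : maxX * maxX - 4 * y ≤ 0
    · rw [if_pos hD]
      rw [List.filter_eq_nil_iff.mpr]
      intro w _
      simp only [decide_eq_true_eq, not_lt]
      nlinarith [sq_nonneg (2 * w - maxX)]
    · rw [if_neg hD]
      push_neg at hm hD
      show _ = PySem.List.pyRange
          (max 0 (-(PySem.Int.floordiv (pyIsqrt (maxX * maxX - 4 * y - 1) - maxX) 2)))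
          (min (maxX - 1) (PySem.Int.floordiv (maxX + pyIsqrt (maxX * maxX - 4 * y - 1)) 2) + 1) 1
      set r := pyIsqrt (maxX * maxX - 4 * y - 1) with hr
      obtain ⟨hr0, hr1, hr2⟩ := pyIsqrt_spec (maxX * maxX - 4 * y - 1) (by omega)
      rw [← hr] at hr0 hr1 hr2
      set q1 := PySem.Int.floordiv (r - maxX) 2 with hq1
      set q2 := PySem.Int.floordiv (maxX + r) 2 with hq2
      have hb1 := fdiv2_bounds (r - maxX)
      have hb2 := fdiv2_bounds (maxX + r)
      rw [← hq1] at hb1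
      rw [← hq2] at hb2
      set L : Int := max 0 (-q1) with hL
      set H : Int := min (maxX - 1) q2 with hH
      have hcongr : ∀ w ∈ PySem.List.pyRange 0 maxX 1,
          (decide (-(-w) * (maxX + -w) > y)) = (decide (L ≤ w ∧ w ≤ H)) := by
        intro w hw
        rw [PySem.List.mem_pyRange_one] at hw
        apply decide_eq_decide.mpr
        have key : (-(-w) * (maxX + -w) > y) ↔ ((2 * w - maxX) * (2 * w - maxX) ≤ maxX * maxX - 4 * y - 1) := by
          constructor <;> intro h <;> nlinarith
        have key2 : ((2 * w - maxX) * (2 * w - maxX) ≤ maxX * maxX - 4 * y - 1)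
            ↔ (-r ≤ 2 * w - maxX ∧ 2 * w - maxX ≤ r) := by
          constructor
          · intro h
            constructor
            · by_contra hc; push_neg at hc; nlinarith
            · by_contra hc; push_neg at hc; nlinarith
          · rintro ⟨h1, h2⟩; nlinarith
        rw [key, key2, hL, hH]
        omega
      rw [List.filter_congr hcongr]
      rw [filter_pyRange_interval L H (maxX).toNat 0 maxX (by omega)]
      have e1 : max 0 L = L := by omega
      have e2 : min maxX (H + 1) = H + 1 := by omega
      rw [e1, e2]
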